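-- pv_equiv track=rewrite | github.com/JDzzz7/DS_exercises | on_off.py | end_product
-- ===== SOURCE A (Python) =====
-- def end_product(start: list, days: int)->list:
--     temp = start[:]
--     for i in range(days):
--         start = temp[:]
--         for j in range(len(start)):
--             if j == 0:
--                 temp[j] = 0
--                 continue
--             if j == (len(start)-1):
--                 temp[j] = 0
--                 break
--             if start[j-1] == start[j+1]:
--                 temp[j] = 0
--             if start[j-1] != start[j+1]:
--                 temp[j] = 1
--     return temp
-- ===== SOURCE B (Python) =====
-- def end_product(start: list, days: int) -> list:
--     if days <= 0:
--         return start[:]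
--     n = len(start)
--     if n <= 2:
--         return [0] * n
--     # bit j of state = cell j; interior cell j becomes (left != right), ends stay 0
--     state = 0
--     for j in range(1, n - 1):
--         if start[j - 1] != start[j + 1]:
--             state |= 1 << j
--     mask = (1 << (n - 1)) - 2  # bits 1..n-2
--     for _ in range(days - 1):
--         state = ((state << 1) ^ (state >> 1)) & mask
--     return [(state >> j) & 1 for j in range(n)]
-- ===== Notes on version B (the rewrite author's own statement) =====
-- stated objective: faster
-- what changed: B replaces A's per-cell nested Python loops with an integer bitmask: the first day sets bit j to (start[j-1]!=start[j+1]), and every further day is advanced whole-row by ((state<<1)^(state>>1)) & interior-mask, decoding to a 0/1 list at the end.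
import Mathlib
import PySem

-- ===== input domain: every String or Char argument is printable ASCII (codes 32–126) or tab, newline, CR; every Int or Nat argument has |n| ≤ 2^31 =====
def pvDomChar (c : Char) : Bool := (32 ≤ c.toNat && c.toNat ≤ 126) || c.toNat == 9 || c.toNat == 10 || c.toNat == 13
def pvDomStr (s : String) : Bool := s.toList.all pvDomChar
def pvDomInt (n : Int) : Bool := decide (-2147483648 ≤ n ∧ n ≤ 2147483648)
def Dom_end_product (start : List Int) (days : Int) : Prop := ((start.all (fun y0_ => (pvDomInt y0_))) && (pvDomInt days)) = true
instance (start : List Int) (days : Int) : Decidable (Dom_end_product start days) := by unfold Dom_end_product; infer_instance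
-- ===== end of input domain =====

-- B re-implements the cellular-automaton simulation on an integer bitmask (bit j = cell j),
-- advancing a whole day with two shifts, a xor and a mask instead of a per-cell Python loop
-- (objective: faster, by constant factor — word-parallel bit operations replace per-cell work).

-- ===== PORT A =====
-- inner 'for j in range(len(start))' loop of A: 'start' is the frozen snapshot read from,
-- 'temp' the list written to; 'break' at j = len-1 returns immediately.
-- indices j-1, j+1 are only read with 1 ≤ j ≤ len-2, so getD never pads.
def innerA (xs : List Int) (temp : List Int) (js : List Nat) : List Int :=
  match js with
  | [] => temp
  | j :: rest =>
    if j = 0 then innerA xs (temp.set j 0) rest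
    else if j = xs.length - 1 then temp.set j 0
    else
      let t1 := if xs.getD (j-1) 0 = xs.getD (j+1) 0 then temp.set j 0 else temp
      let t2 := if xs.getD (j-1) 0 ≠ xs.getD (j+1) 0 then t1.set j 1 else t1
      innerA xs t2 rest

def end_product (start : List Int) (days : Int) : List Int :=
  (List.range days.toNat).foldl
    (fun temp _ => innerA temp temp (List.range temp.length)) start

-- ===== PORT B =====
def end_product_alt (start : List Int) (days : Int) : List Int :=
  if days ≤ 0 then start
  else
    let n := start.length
    if n ≤ 2 then List.replicate n 0
    else
      let s0 : Nat := (List.range' 1 (n-2)).foldl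
        (fun st j => if start.getD (j-1) 0 ≠ start.getD (j+1) 0 then st ||| (1 <<< j) else st) 0
      let mask : Nat := (1 <<< (n-1)) - 2
      let s := (List.range (days.toNat - 1)).foldl
        (fun st _ => ((st <<< 1) ^^^ (st >>> 1)) &&& mask) s0
      (List.range n).map (fun j => (((s >>> j) &&& 1 : Nat) : Int))

-- ===== PRECONDITION & SPEC =====
def Spec_end_product (start : List Int) (days : Int) (out : List Int) : Prop := out = end_product_alt start days
instance (start : List Int) (days : Int) (out : List Int) : Decidable (Spec_end_product start days out) := by unfold Spec_end_product; infer_instance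

-- ===== CLAIM (what is proved, stated in full; the proofs are below) =====
def Claim_equal_end_product : Prop := ∀ (start : List Int) (days : Int), Dom_end_product start days → Spec_end_product start days (end_product start days)

-- ===== LEMMAS AND PROOFS =====

-- the pure one-day step that A's inner loop computes
def stepVal (xs : List Int) (j : Nat) : Int :=
  if j = 0 then 0 else if j = xs.length - 1 then 0
  else if xs.getD (j-1) 0 = xs.getD (j+1) 0 then 0 else 1

def stepL (xs : List Int) : List Int := (List.range xs.length).map (stepVal xs)

theorem stepL_length (xs : List Int) : (stepL xs).length = xs.length := by
  simp [stepL]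

theorem stepL_getD (xs : List Int) (j : Nat) (h : j < xs.length) :
    (stepL xs).getD j 0 = stepVal xs j := by
  rw [List.getD_eq_getElem _ _ (by simpa [stepL] using h)]
  simp [stepL]

theorem innerA_nil (xs temp : List Int) : innerA xs temp [] = temp := rfl

theorem innerA_cons_zero (xs temp : List Int) (rest : List Nat) :
    innerA xs temp (0 :: rest) = innerA xs (temp.set 0 0) rest := by
  simp [innerA]

theorem innerA_cons_last (xs temp : List Int) (rest : List Nat) (j : Nat)
    (h0 : j ≠ 0) (hl : j = xs.length - 1) :
    innerA xs temp (j :: rest) = temp.set j 0 := by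
  simp only [innerA, if_neg h0, if_pos hl]

theorem innerA_cons_mid (xs temp : List Int) (rest : List Nat) (j : Nat)
    (h0 : j ≠ 0) (hl : j ≠ xs.length - 1) :
    innerA xs temp (j :: rest) = innerA xs (temp.set j (stepVal xs j)) rest := by
  simp only [innerA, stepVal, if_neg h0, if_neg hl]
  by_cases hcmp : xs.getD (j-1) 0 = xs.getD (j+1) 0
  · rw [if_pos hcmp, if_pos hcmp, if_neg (not_not_intro hcmp)]
  · rw [if_neg hcmp, if_neg hcmp, if_pos hcmp]

theorem innerA_spec (xs : List Int) : ∀ (m k : Nat) (temp : List Int),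
    temp.length = xs.length → k + m = xs.length →
    (innerA xs temp (List.range' k m)).length = xs.length ∧
    ∀ j, j < xs.length → (innerA xs temp (List.range' k m)).getD j 0 =
      if k ≤ j then stepVal xs j else temp.getD j 0 := by
  intro m
  induction m with
  | zero =>
    intro k temp hlen hk
    simp only [List.range'_zero, innerA_nil]
    exact ⟨hlen, fun j hj => by rw [if_neg (by omega)]⟩
  | succ m ih =>
    intro k temp hlen hk
    rw [List.range'_succ]
    by_cases hk0 : k = 0
    · subst hk0
      rw [innerA_cons_zero]
      obtain ⟨ihl, ihd⟩ := ih (0+1) (temp.set 0 0) (by simp [hlen]) (by omega)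
      refine ⟨ihl, fun j hj => ?_⟩
      rw [ihd j hj]
      rcases Nat.eq_zero_or_pos j with hj0 | hj1
      · subst hj0
        rw [if_neg (by omega), if_pos (le_refl 0),
            List.getD_eq_getElem _ _ (by simp [List.length_set]; omega),
            List.getElem_set]
        simp [stepVal]
      · rw [if_pos (show 0+1 ≤ j by omega), if_pos (Nat.zero_le j)]
    · by_cases hklast : k = xs.length - 1
      · rw [innerA_cons_last xs temp _ k hk0 hklast]
        refine ⟨by simp [hlen], fun j hj => ?_⟩
        by_cases hjk : k ≤ j
        · have hjeq : j = k := by omega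
          subst hjeq
          rw [if_pos hjk, List.getD_eq_getElem _ _ (by simp [hlen]; omega),
              List.getElem_set, if_pos rfl]
          simp [stepVal, hklast]
        · rw [if_neg hjk,
              List.getD_eq_getElem _ _ (by simp [hlen]; omega),
              List.getD_eq_getElem _ _ (by omega),
              List.getElem_set, if_neg (by omega)]
      · rw [innerA_cons_mid xs temp _ k hk0 hklast]
        obtain ⟨ihl, ihd⟩ := ih (k+1) (temp.set k (stepVal xs k)) (by simp [hlen]) (by omega)
        refine ⟨ihl, fun j hj => ?_⟩
        rw [ihd j hj]
        by_cases hjk : k + 1 ≤ j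
        · rw [if_pos hjk, if_pos (by omega)]
        · by_cases hje : j = k
          · subst hje
            rw [if_neg (by omega), if_pos (le_refl j),
                List.getD_eq_getElem _ _ (by simp [hlen]; omega),
                List.getElem_set, if_pos rfl]
          · rw [if_neg hjk, if_neg (by omega),
                List.getD_eq_getElem _ _ (by simp [hlen]; omega),
                List.getD_eq_getElem _ _ (by omega),
                List.getElem_set, if_neg (by omega)]

theorem innerA_eq_stepL (xs : List Int) :
    innerA xs xs (List.range xs.length) = stepL xs := by
  rw [List.range_eq_range']
  obtain ⟨hl, hd⟩ := innerA_spec xs xs.length 0 xs rfl (by omega)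
  apply List.ext_getElem (by rw [hl, stepL_length])
  intro j h1 h2
  have hj : j < xs.length := by omega
  have hx := hd j hj
  rw [if_pos (Nat.zero_le j)] at hx
  rw [← List.getD_eq_getElem _ 0 h1, ← List.getD_eq_getElem _ 0 h2, hx,
      stepL_getD xs j hj]

theorem foldl_range_iterate {α : Type} (f : α → α) :
    ∀ (d : Nat) (x : α), (List.range d).foldl (fun a _ => f a) x = f^[d] x := by
  intro d
  induction d with
  | zero => intro x; simp
  | succ d ih =>
    intro x
    rw [List.range_succ, List.foldl_append, ih, Function.iterate_succ_apply']
    rfl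

theorem end_product_eq_iterate (start : List Int) (days : Int) :
    end_product start days = stepL^[days.toNat] start := by
  unfold end_product
  have : (fun (temp : List Int) (_ : Nat) => innerA temp temp (List.range temp.length))
      = fun temp _ => stepL temp := by
    funext temp _
    exact innerA_eq_stepL temp
  rw [this, foldl_range_iterate stepL days.toNat start]

-- small lists collapse to all-zero after one day
theorem stepL_small (xs : List Int) (h : xs.length ≤ 2) :
    stepL xs = List.replicate xs.length 0 := by
  match xs, h with
  | [], _ => rfl
  | [a], _ => simp [stepL, stepVal, List.range_succ]
  | [a, b], _ =>
    simp [stepL, stepVal, List.range_succ]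

theorem iterate_stepL_replicate (n : Nat) (h : n ≤ 2) :
    ∀ k, stepL^[k] (List.replicate n 0) = List.replicate n 0 := by
  intro k
  induction k with
  | zero => rfl
  | succ k ih =>
    rw [Function.iterate_succ_apply]
    have : stepL (List.replicate n 0) = List.replicate n 0 := by
      have := stepL_small (List.replicate n 0) (by simpa using h)
      simpa using this
    rw [this, ih]

-- bit characterisation of B's initial state
theorem s0_testBit {P : Nat → Prop} [DecidablePred P] :
    ∀ (t a : Nat) (st : Nat) (j : Nat),
    ((List.range' a t).foldl (fun st j => if P j then st ||| (1 <<< j) else st) st).testBit j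
      = (st.testBit j || decide (a ≤ j ∧ j < a + t ∧ P j)) := by
  intro t
  induction t with
  | zero =>
    intro a st j
    rw [decide_eq_false (fun h => by omega)]
    simp
  | succ t ih =>
    intro a st j
    rw [List.range'_succ, List.foldl_cons, ih (a+1)]
    by_cases hP : P a
    · simp only [if_pos hP, Nat.one_shiftLeft, Nat.testBit_or, Nat.testBit_two_pow,
        Bool.or_assoc]
      congr 1
      by_cases hja : a = j
      · subst hja
        rw [decide_eq_true rfl, Bool.true_or,
            decide_eq_true (show a ≤ a ∧ a < a + (t+1) ∧ P a from ⟨le_refl a, by omega, hP⟩)]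
      · rw [decide_eq_false hja, Bool.false_or]
        rw [decide_eq_decide]
        constructor
        · rintro ⟨h1, h2, h3⟩; exact ⟨by omega, by omega, h3⟩
        · rintro ⟨h1, h2, h3⟩; exact ⟨by omega, by omega, h3⟩
    · simp only [if_neg hP]
      congr 1
      by_cases hja : a = j
      · subst hja
        rw [decide_eq_false (fun h => by omega),
            decide_eq_false (fun h => hP h.2.2)]
      · rw [decide_eq_decide]
        constructor
        · rintro ⟨h1, h2, h3⟩; exact ⟨by omega, by omega, h3⟩
        · rintro ⟨h1, h2, h3⟩; exact ⟨by omega, by omega, h3⟩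

-- bitmask step: one day on the mask
theorem mask_testBit (n : Nat) (hn : 3 ≤ n) (j : Nat) :
    ((1 <<< (n-1)) - 2 : Nat).testBit j = decide (1 ≤ j ∧ j < n - 1) := by
  have hmask : ((1 <<< (n-1)) - 2 : Nat) = (2^(n-2) - 1) <<< 1 := by
    rw [Nat.one_shiftLeft, Nat.shiftLeft_eq, pow_one]
    have h1 : (1:Nat) ≤ 2^(n-2) := Nat.one_le_two_pow
    have h2 : (2:Nat)^(n-1) = 2^(n-2) * 2 := by
      rw [← pow_succ]
      congr 1
      omega
    omega
  rw [hmask, Nat.testBit_shiftLeft, Nat.testBit_two_pow_sub_one]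
  rcases Nat.lt_or_ge j 1 with h | h
  · have hj0 : j = 0 := by omega
    subst hj0
    simp
  · rw [decide_eq_true (show 1 ≤ j by omega), Bool.true_and, decide_eq_decide]
    omega

theorem bstep_testBit (n : Nat) (hn : 3 ≤ n) (s : Nat) (j : Nat) :
    (((s <<< 1) ^^^ (s >>> 1)) &&& ((1 <<< (n-1)) - 2)).testBit j
      = (decide (1 ≤ j ∧ j < n - 1) && (s.testBit (j-1) ^^ s.testBit (j+1))) := by
  rw [Nat.testBit_and, Nat.testBit_xor, Nat.testBit_shiftLeft, Nat.testBit_shiftRight,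
      mask_testBit n hn j, Bool.and_comm]
  rcases Nat.lt_or_ge j 1 with h | h
  · have hj0 : j = 0 := by omega
    subst hj0
    simp
  · simp only [Nat.add_comm 1 j, decide_eq_true (show 1 ≤ j by omega), Bool.true_and]

-- invariant: list L (values 0/1) matches bitmask s
def BitRel (n : Nat) (L : List Int) (s : Nat) : Prop :=
  L.length = n ∧ ∀ j, j < n → L.getD j 0 = (if s.testBit j then (1:Int) else 0)

theorem bitrel_init (start : List Int) (hn : 3 ≤ start.length) :
    BitRel start.length (stepL start)
      ((List.range' 1 (start.length-2)).foldl
        (fun st j => if start.getD (j-1) 0 ≠ start.getD (j+1) 0 then st ||| (1 <<< j) else st) 0) := by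
  constructor
  · exact stepL_length start
  · intro j hj
    rw [stepL_getD start j hj,
        s0_testBit (P := fun j => start.getD (j-1) 0 ≠ start.getD (j+1) 0) (start.length-2) 1 0 j]
    rw [Nat.zero_testBit, Bool.false_or]
    simp only [stepVal]
    by_cases h0 : j = 0
    · subst h0; simp
    · by_cases hl : j = start.length - 1
      · rw [if_neg h0, if_pos hl]
        rw [decide_eq_false (fun h => absurd h.2.1 (by omega))]
        simp
      · rw [if_neg h0, if_neg hl]
        by_cases hcmp : start.getD (j-1) 0 = start.getD (j+1) 0
        · rw [if_pos hcmp, decide_eq_false (fun h => h.2.2 hcmp)]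
          simp
        · rw [if_neg hcmp, decide_eq_true (show _ ∧ _ ∧ _ from ⟨by omega, by omega, hcmp⟩)]
          simp

theorem bitrel_step (n : Nat) (hn : 3 ≤ n) (L : List Int) (s : Nat)
    (h : BitRel n L s) :
    BitRel n (stepL L) (((s <<< 1) ^^^ (s >>> 1)) &&& ((1 <<< (n-1)) - 2)) := by
  obtain ⟨hlen, hbit⟩ := h
  constructor
  · rw [stepL_length, hlen]
  · intro j hj
    rw [stepL_getD L j (by omega), bstep_testBit n hn s j]
    simp only [stepVal, hlen]
    by_cases h0 : j = 0
    · subst h0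
      rw [if_pos rfl, decide_eq_false (by omega)]
      simp
    · by_cases hl : j = n - 1
      · rw [if_neg h0, if_pos hl, decide_eq_false (by omega)]
        simp
      · rw [if_neg h0, if_neg hl, decide_eq_true (by exact ⟨by omega, by omega⟩)]
        rw [hbit (j-1) (by omega), hbit (j+1) (by omega), Bool.true_and]
        cases hb1 : s.testBit (j-1) <;> cases hb2 : s.testBit (j+1) <;> simp

theorem bitrel_iterate (n : Nat) (hn : 3 ≤ n) (L : List Int) (s : Nat)
    (h : BitRel n L s) (k : Nat) :
    BitRel n (stepL^[k] L) ((fun st => ((st <<< 1) ^^^ (st >>> 1)) &&& ((1 <<< (n-1)) - 2))^[k] s) := by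
  induction k with
  | zero => exact h
  | succ k ih =>
    rw [Function.iterate_succ_apply', Function.iterate_succ_apply']
    exact bitrel_step n hn _ _ ih

theorem bitval_eq (s : Nat) (j : Nat) :
    ((s >>> j) &&& 1 : Nat) = if s.testBit j then 1 else 0 := by
  rw [Nat.and_one_is_mod]
  rw [Nat.shiftRight_eq_div_pow]
  have : s.testBit j = (s / 2^j % 2 == 1) := by
    simp [Nat.testBit, Nat.shiftRight_eq_div_pow]
  rw [this]
  rcases Nat.mod_two_eq_zero_or_one (s / 2^j) with h | h <;> simp [h]

-- ===== VERDICT (by name: the statement is the Claim_ definition above) =====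
theorem end_product_spec : Claim_equal_end_product := by
  intro start days _
  unfold Spec_end_product
  rw [end_product_eq_iterate]
  unfold end_product_alt
  by_cases hd : days ≤ 0
  · rw [if_pos hd]
    have : days.toNat = 0 := by omega
    rw [this]
    rfl
  · rw [if_neg hd]
    have hd1 : 1 ≤ days.toNat := by omega
    have hsplit : stepL^[days.toNat] start = stepL^[days.toNat - 1] (stepL start) := by
      conv_lhs => rw [show days.toNat = (days.toNat - 1) + 1 by omega]
      rw [Function.iterate_succ_apply]
    by_cases hn : start.length ≤ 2
    · rw [if_pos hn, hsplit, stepL_small start hn]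
      have := iterate_stepL_replicate start.length hn (days.toNat - 1)
      rw [this]
    · rw [if_neg hn]
      have hn3 : 3 ≤ start.length := by omega
      show stepL^[days.toNat] start =
        (List.range start.length).map (fun j =>
          Int.ofNat ((((List.range (days.toNat - 1)).foldl
              (fun st _ => ((st <<< 1) ^^^ (st >>> 1)) &&& ((1 <<< (start.length-1)) - 2))
              ((List.range' 1 (start.length-2)).foldl
                (fun st j => if start.getD (j-1) 0 ≠ start.getD (j+1) 0 then st ||| (1 <<< j) else st)
                0)) >>> j) &&& 1))
      rw [foldl_range_iterate
            (fun st => ((st <<< 1) ^^^ (st >>> 1)) &&& ((1 <<< (start.length-1)) - 2)),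
          hsplit]
      obtain ⟨hlen, hbit⟩ := bitrel_iterate start.length hn3 (stepL start) _
        (bitrel_init start hn3) (days.toNat - 1)
      apply List.ext_getElem (by simp [hlen])
      intro j h1 h2
      have hj : j < start.length := by omega
      rw [← List.getD_eq_getElem _ 0 h1, hbit j hj]
      simp only [List.getElem_map, List.getElem_range]
      rw [bitval_eq]
      split <;> simp
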